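-- pv_equiv track=rewrite | github.com/Lion2cat/rawBeans | format_coffee_data.py | categorize_by_origin
-- ===== SOURCE A (Python) =====
-- def categorize_by_origin(data):
--     """按产地分类数据"""
--     categorized = {}
--
--     # 按照原产地分类
--     for product in data:
--         origin = product.get('origin', '')
--         if not origin:
--             origin = "未知产地"
--
--         if origin not in categorized:
--             categorized[origin] = []
--
--         categorized[origin].append(product)
--
--     # 按产地名称排序
--     return dict(sorted(categorized.items()))
-- ===== SOURCE B (Python) =====
-- def categorize_by_origin(data):
--     """按产地分类数据"""
--     def key_of(product):
--         return product.get('origin', '') or "未知产地"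
--     origins = sorted({key_of(p) for p in data})
--     return {k: [p for p in data if key_of(p) == k] for k in origins}
-- ===== Notes on version B (the rewrite author's own statement) =====
-- stated objective: alternative
-- what changed: Replaces A's incremental dict-grouping pass followed by sorting the items with sorting the distinct origin keys first and then building each group by filtering the input list per key.
import Mathlib
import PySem

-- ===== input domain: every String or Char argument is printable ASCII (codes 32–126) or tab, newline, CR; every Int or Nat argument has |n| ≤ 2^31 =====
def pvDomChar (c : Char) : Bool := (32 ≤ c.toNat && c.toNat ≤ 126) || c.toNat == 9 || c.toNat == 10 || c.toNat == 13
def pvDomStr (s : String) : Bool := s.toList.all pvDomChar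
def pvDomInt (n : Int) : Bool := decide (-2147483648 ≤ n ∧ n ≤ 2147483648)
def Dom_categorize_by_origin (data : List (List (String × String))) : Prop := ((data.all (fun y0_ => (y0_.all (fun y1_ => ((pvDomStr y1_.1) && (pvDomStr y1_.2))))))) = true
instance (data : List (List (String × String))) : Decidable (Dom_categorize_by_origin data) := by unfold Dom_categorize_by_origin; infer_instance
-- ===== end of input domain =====

-- B groups by sorting the distinct origin keys and filtering the input per key, instead of A's
-- incremental dict-grouping pass followed by sorting the items (alternative decomposition, same result).

-- ===== PORT A =====
-- Literal port of A. 'sorted(categorized.items())' is ported as sorting the items by their first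
-- component — exact here, because the dict's keys are distinct so Python's tuple comparison is
-- decided by the first components alone.
def categorize_by_origin (data : List (List (String × String))) : List (String × List (List (String × String))) :=
  let categorized : PySem.Dict String (List (List (String × String))) :=
    data.foldl (fun d product =>
      let origin0 := (PySem.Dict.mk product).getD "origin" ""
      let origin := if origin0 = "" then "未知产地" else origin0
      let d := if d.contains origin then d else d.insert origin []
      d.modify origin [] (· ++ [product])) PySem.Dict.empty
  PySem.List.sorted categorized.items (fun kv => kv.1) false

-- ===== PORT B =====
-- B's helper key_of: product.get('origin', '') or "未知产地"
def pvKeyOf (product : List (String × String)) : String :=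
  let o := (PySem.Dict.mk product).getD "origin" ""
  if o = "" then "未知产地" else o

def categorize_by_origin_alt (data : List (List (String × String))) : List (String × List (List (String × String))) :=
  let origins := PySem.List.sorted (PySem.Set.ofList (data.map pvKeyOf)) (fun x => x) false
  origins.map (fun k => (k, data.filter (fun p => pvKeyOf p == k)))

-- ===== PRECONDITION & SPEC =====
def Spec_categorize_by_origin (data : List (List (String × String))) (out : List (String × List (List (String × String)))) : Prop := out = categorize_by_origin_alt data
instance (data : List (List (String × String))) (out : List (String × List (List (String × String)))) : Decidable (Spec_categorize_by_origin data out) := by unfold Spec_categorize_by_origin; infer_instance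

-- ===== CLAIM (what is proved, stated in full; the proofs are below) =====
def Claim_equal_categorize_by_origin : Prop := ∀ (data : List (List (String × String))), Dom_categorize_by_origin data → Spec_categorize_by_origin data (categorize_by_origin data)

-- ===== LEMMAS AND PROOFS =====

-- A's 'if absent, insert []; then append' step is the single modify step
lemma pv_step_eq (d : PySem.Dict String (List (List (String × String)))) (k : String)
    (p : List (String × String)) :
    (if d.contains k then d else d.insert k []).modify k [] (· ++ [p])
      = d.modify k [] (· ++ [p]) := by
  by_cases hc : d.contains k
  · simp [hc]
  · have hc' : d.contains k = false := by simpa using hc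
    have hk : ∀ q ∈ d.items, q.1 ≠ k := by
      intro q hq hqk
      have hm : k ∈ d.keys := by
        simpa [PySem.Dict.keys, hqk] using List.mem_map_of_mem (f := (·.1)) hq
      rw [← PySem.Dict.contains_iff_mem_keys] at hm
      simp [hm] at hc'
    have hins : d.insert k ([] : List (List (String × String))) = ⟨d.items ++ [(k, [])]⟩ := by
      simp [PySem.Dict.insert, hc']
    simp [PySem.Dict.modify, PySem.Dict.insert, hc']
    constructor
    · have := List.map_congr_left (l := d.items)
        (f := fun q => if q.1 = k then
          (k, (⟨d.items ++ [(k, [])]⟩ : PySem.Dict String (List (List (String × String)))).getD k [] ++ [p]) else q)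
        (g := id) (fun q hq => by simp only [if_neg (hk q hq)]; rfl)
      simpa using this
    · rw [← hins, PySem.Dict.getD_insert_self]
      exact (PySem.Dict.getD_of_not_contains d _ hc').symm

-- the dict A builds, described by its items over the distinct keys
lemma pv_dict_items (data : List (List (String × String))) :
    (data.foldl (fun d product =>
      let origin0 := (PySem.Dict.mk product).getD "origin" ""
      let origin := if origin0 = "" then "未知产地" else origin0
      let d := if d.contains origin then d else d.insert origin []
      d.modify origin [] (· ++ [product])) PySem.Dict.empty).items
    = (PySem.Set.ofList (data.map pvKeyOf)).map
        (fun k => (k, data.filter (fun p => pvKeyOf p == k))) := by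
  have hstep : (fun (d : PySem.Dict String (List (List (String × String)))) product =>
      let origin0 := (PySem.Dict.mk product).getD "origin" ""
      let origin := if origin0 = "" then "未知产地" else origin0
      let d := if d.contains origin then d else d.insert origin []
      d.modify origin [] (· ++ [product]))
      = (fun d p => d.modify (pvKeyOf p) [] (fun v => v ++ [p])) := by
    funext d p
    exact pv_step_eq d (pvKeyOf p) p
  rw [hstep]
  set D := data.foldl (fun d p => PySem.Dict.modify d (pvKeyOf p) [] (fun v => v ++ [p])) PySem.Dict.empty with hD
  have hkeys : D.keys = PySem.Set.ofList (data.map pvKeyOf) := by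
    have h := PySem.Dict.keys_foldl_modify_key data pvKeyOf []
      (fun _ p v => v ++ [p]) PySem.Dict.empty
    simpa [PySem.Dict.keys_empty] using h
  have hnd : D.keys.Nodup :=
    PySem.Dict.nodup_keys_foldl_modify_key data pvKeyOf [] (fun _ p v => v ++ [p])
      PySem.Dict.empty (by simp)
  have hget : ∀ k, D.getD k [] = data.filter (fun p => pvKeyOf p == k) := by
    intro k
    have hm : D = (data.map (fun p => (pvKeyOf p, p))).foldl
        (fun d q => d.modify q.1 [] (fun v => v ++ [q.2])) PySem.Dict.empty := by
      rw [hD, List.foldl_map]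
    rw [hm, PySem.Dict.getD_foldl_modify_append]
    simp [List.filter_map, Function.comp_def]
  rw [PySem.Dict.items_eq_map_keys D hnd [], hkeys]
  exact List.map_congr_left (fun k _ => by rw [hget k])

-- ===== VERDICT (by name: the statement is the Claim_ definition above) =====
theorem categorize_by_origin_spec : Claim_equal_categorize_by_origin := by
  intro data _
  show PySem.List.sorted (List.foldl (fun d product =>
      let origin0 := (PySem.Dict.mk product).getD "origin" ""
      let origin := if origin0 = "" then "未知产地" else origin0
      let d := if d.contains origin then d else d.insert origin []
      d.modify origin [] (· ++ [product])) PySem.Dict.empty data).items (fun kv => kv.1) false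
    = (PySem.List.sorted (PySem.Set.ofList (data.map pvKeyOf)) (fun x => x) false).map
        (fun k => (k, data.filter (fun p => pvKeyOf p == k)))
  rw [pv_dict_items data]
  apply PySem.List.sorted_eq_of_perm_of_pairwise_lt
  · exact (PySem.List.sorted_perm (PySem.Set.ofList (data.map pvKeyOf)) (fun x => x) false).map _
  · have h := PySem.List.sorted_ofList_pairwise_lt (data.map pvKeyOf)
    exact h.map _ (fun a b hab => hab)
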